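-- pv_equiv track=rewrite | github.com/kurnoolion/req-agent | core/src/query/context_builder.py | _strip_chunk_headers
-- ===== SOURCE A (Python) =====
-- def _strip_chunk_headers(text: str) -> str:
--     """Strip the contextualization headers from chunk text.
--
--     The chunk text has [MNO: ...], [Path: ...], [Req ID: ...] headers
--     added by ChunkBuilder. Since ContextBuilder adds its own headers,
--     strip these to avoid duplication.
--     """
--     lines = text.split("\n")
--     content_lines = []
--     header_done = False
--
--     for line in lines:
--         if not header_done and line.startswith("[") and "]" in line:
--             continue  # Skip header lines
--         else:
--             header_done = True
--             content_lines.append(line)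
--
--     return "\n".join(content_lines).strip()
-- ===== SOURCE B (Python) =====
-- def _strip_chunk_headers(text: str) -> str:
--     """Strip the contextualization headers from chunk text.
--
--     Works on the raw string: repeatedly chops the first line off the
--     remaining suffix (str.partition) while it is a bracketed header,
--     then strips the suffix -- no split into a line list, no flag, no join.
--     """
--     head, _sep, rest = text.partition("\n")
--     while head.startswith("[") and "]" in head:
--         text = rest
--         head, _sep, rest = text.partition("\n")
--     return text.strip()
-- ===== Notes on version B (the rewrite author's own statement) =====
-- stated objective: alternative
-- what changed: B never builds a line list: it works on the raw string, repeatedly chopping the first line off the remaining suffix with str.partition while it is a bracketed header, then strips that suffix -- A's split/flag-loop/append/join pipeline disappears.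
import Mathlib
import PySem

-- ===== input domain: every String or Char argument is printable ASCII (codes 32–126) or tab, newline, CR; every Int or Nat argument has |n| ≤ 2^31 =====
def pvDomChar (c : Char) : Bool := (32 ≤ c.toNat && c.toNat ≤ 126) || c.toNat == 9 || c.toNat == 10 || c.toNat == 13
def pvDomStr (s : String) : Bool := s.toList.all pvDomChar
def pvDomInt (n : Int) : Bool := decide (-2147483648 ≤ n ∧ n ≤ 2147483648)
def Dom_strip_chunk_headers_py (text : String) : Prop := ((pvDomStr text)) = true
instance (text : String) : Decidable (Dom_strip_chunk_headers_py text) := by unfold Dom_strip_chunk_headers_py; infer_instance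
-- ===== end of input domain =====

-- B drops the leading bracketed header lines by chopping them off the raw string
-- with str.partition, never building a line list — alternative decomposition, same cost.

-- ===== PORT A =====
-- the header-line test 'line.startswith("[") and "]" in line'
def pvIsHeader (line : String) : Bool :=
  PySem.Str.startswith line "[" && PySem.Str.isIn "]" line

-- the for-loop over lines, carrying (header_done, content_lines)
def pvLoopA (st : Bool × List String) (line : String) : Bool × List String :=
  if !st.1 && pvIsHeader line then st else (true, st.2 ++ [line])

def strip_chunk_headers_py (text : String) : String :=
  -- sep "\n" ≠ "", so split? is always some
  let lines := (PySem.Str.split? text "\n").getD []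
  let st := lines.foldl pvLoopA (false, [])
  PySem.Str.strip (PySem.Str.join "\n" st.2)

-- ===== PORT B =====
-- the same header test, on the List Char side
def pvIsHeaderC (head : List Char) : Bool :=
  PySem.Chars.startswith head ['['] && PySem.Chars.isIn [']'] head

-- hand port of text.partition("\n") for the one-char separator "\n" (exact):
-- .1 = text up to the first '\n', .2.1 = separator found, .2.2 = suffix after it
def pvPartitionNL (t : List Char) : List Char × Bool × List Char :=
  if '\n' ∈ t then (t.takeWhile (· ≠ '\n'), true, t.drop ((t.takeWhile (· ≠ '\n')).length + 1))
  else (t, false, [])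

-- termination of B's loop: chopping a nonempty header line shortens the suffix
theorem pvPartition_decreases (t : List Char) (h : pvIsHeaderC (pvPartitionNL t).1 = true) :
    (pvPartitionNL t).2.2.length < t.length := by
  have hne : (pvPartitionNL t).1 ≠ [] := by
    intro he
    rw [he] at h
    simp [pvIsHeaderC, PySem.Chars.startswith] at h
  by_cases hm : '\n' ∈ t
  · have ht : 0 < t.length := by
      cases t with
      | nil => simp at hm
      | cons a b => simp
    simp only [pvPartitionNL, if_pos hm, List.length_drop]
    omega
  · have ht : t ≠ [] := by
      intro he
      apply hne
      simp [pvPartitionNL, he]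
    simp only [pvPartitionNL, if_neg hm, List.length_nil]
    exact List.length_pos_of_ne_nil ht

-- the while-loop of B: re-partition the remaining suffix while its first line is a header
def pvAltGo (t : List Char) : List Char :=
  if pvIsHeaderC (pvPartitionNL t).1 then pvAltGo (pvPartitionNL t).2.2 else t
termination_by t.length
decreasing_by exact pvPartition_decreases t (by assumption)

def strip_chunk_headers_py_alt (text : String) : String :=
  PySem.Str.strip (String.ofList (pvAltGo text.toList))

-- ===== PRECONDITION & SPEC =====
def Spec_strip_chunk_headers_py (text : String) (out : String) : Prop := out = strip_chunk_headers_py_alt text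
instance (text : String) (out : String) : Decidable (Spec_strip_chunk_headers_py text out) := by unfold Spec_strip_chunk_headers_py; infer_instance

-- ===== CLAIM (what is proved, stated in full; the proofs are below) =====
def Claim_equal_strip_chunk_headers_py : Prop := ∀ (text : String), Dom_strip_chunk_headers_py text → Spec_strip_chunk_headers_py text (strip_chunk_headers_py text)

-- ===== LEMMAS AND PROOFS =====

-- once header_done is true, A's loop appends every remaining line
theorem pvLoopA_done (lines : List String) (acc : List String) :
    (lines.foldl pvLoopA (true, acc)).2 = acc ++ lines := by
  induction lines generalizing acc with
  | nil => simp
  | cons l ls ih => simp [pvLoopA, ih]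

-- A's flag loop computes dropWhile of the header predicate
theorem pvLoopA_eq_dropWhile (lines : List String) :
    (lines.foldl pvLoopA (false, [])).2 = lines.dropWhile pvIsHeader := by
  induction lines with
  | nil => simp
  | cons l ls ih =>
    by_cases h : pvIsHeader l = true
    · simpa [pvLoopA, h, List.dropWhile_cons] using ih
    · simp [pvLoopA, h, pvLoopA_done]

-- proof-only model of splitting on '\n'
def pvLines : List Char → List (List Char)
  | [] => [[]]
  | c :: rest => if c = '\n' then [] :: pvLines rest else (pvLines rest).modifyHead (c :: ·)

theorem pvLines_ne_nil (cs : List Char) : pvLines cs ≠ [] := by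
  cases cs with
  | nil => simp [pvLines]
  | cons c rest =>
    simp only [pvLines]
    split
    · simp
    · exact fun h => pvLines_ne_nil rest (by simpa using List.modifyHead_eq_nil_iff.mp h)

-- PySem's fuelled splitter, on sep = ['\n'], computes pvLines
theorem pvSplitGo_eq (fuel : Nat) : ∀ (l cur : List Char) (acc : List (List Char)),
    l.length < fuel →
    PySem.Chars.splitOn.go ['\n'] fuel l cur acc
      = acc.reverse ++ (pvLines l).modifyHead (cur.reverse ++ ·) := by
  induction fuel with
  | zero => intro l cur acc h; omega
  | succ f ih =>
    intro l cur acc h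
    cases l with
    | nil =>
      show (cur.reverse :: acc).reverse = _
      simp [pvLines]
    | cons c rest =>
      by_cases hc : c = '\n'
      · subst hc
        show PySem.Chars.splitOn.go ['\n'] f rest [] (cur.reverse :: acc) = _
        rw [ih rest [] (cur.reverse :: acc) (by simpa using Nat.lt_of_succ_lt_succ h)]
        obtain ⟨a, t, hat⟩ := List.exists_cons_of_ne_nil (pvLines_ne_nil rest)
        simp [pvLines, hat]
      · have hstep : PySem.Chars.splitOn.go ['\n'] (f + 1) (c :: rest) cur acc
            = PySem.Chars.splitOn.go ['\n'] f rest (c :: cur) acc := by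
          have hp : ['\n'].isPrefixOf (c :: rest) = false := by
            simp only [List.isPrefixOf, Bool.and_eq_false_iff, beq_eq_false_iff_ne, ne_eq]
            exact Or.inl fun hx => hc hx.symm
          show (if ['\n'].isPrefixOf (c :: rest) = true then _ else _) = _
          simp [hp]
        rw [hstep, ih rest (c :: cur) acc (by simpa using Nat.lt_of_succ_lt_succ h)]
        obtain ⟨a, t, hat⟩ := List.exists_cons_of_ne_nil (pvLines_ne_nil rest)
        simp [pvLines, hc, hat]

theorem pvSplitOn_eq_pvLines (cs : List Char) :
    PySem.Chars.splitOn cs ['\n'] = pvLines cs := by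
  rw [PySem.Chars.splitOn.eq_1, pvSplitGo_eq (cs.length + 1) cs [] [] (Nat.lt_succ_self _)]
  obtain ⟨a, t, hat⟩ := List.exists_cons_of_ne_nil (pvLines_ne_nil cs)
  simp [hat]

theorem pvTakeWhile_all (cs : List Char) (hm : '\n' ∉ cs) :
    cs.takeWhile (· ≠ '\n') = cs := by
  apply List.takeWhile_eq_self_iff.mpr
  intro x hx
  simp only [ne_eq, decide_eq_true_eq]
  exact fun h => hm (h ▸ hx)

theorem pvPartition_fst (cs : List Char) :
    (pvPartitionNL cs).1 = cs.takeWhile (· ≠ '\n') := by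
  by_cases hm : '\n' ∈ cs
  · simp [pvPartitionNL, hm]
  · simp only [pvPartitionNL, if_neg hm]
    exact (pvTakeWhile_all cs hm).symm

-- structure of pvLines: first line, then the lines of the suffix after the first '\n'
theorem pvLines_shape (cs : List Char) :
    pvLines cs = cs.takeWhile (· ≠ '\n')
      :: (if '\n' ∈ cs then pvLines (cs.drop ((cs.takeWhile (· ≠ '\n')).length + 1)) else []) := by
  induction cs with
  | nil => simp [pvLines]
  | cons c rest ih =>
    by_cases hc : c = '\n'
    · subst hc
      simp [pvLines]
    · rw [pvLines, if_neg hc, ih]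
      simp [hc, Ne.symm hc]

-- joining the lines back gives the original characters
theorem pvJoin_pvLines (cs : List Char) :
    PySem.Chars.join ['\n'] (pvLines cs) = cs := by
  induction cs with
  | nil => simp [pvLines, PySem.Chars.join_singleton]
  | cons c rest ih =>
    obtain ⟨a, t, hat⟩ := List.exists_cons_of_ne_nil (pvLines_ne_nil rest)
    rw [hat] at ih
    by_cases hc : c = '\n'
    · subst hc
      rw [pvLines, if_pos rfl, hat, PySem.Chars.join_cons_cons, ih]
      simp
    · rw [pvLines, if_neg hc, hat, List.modifyHead_cons]
      cases t with
      | nil =>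
        rw [PySem.Chars.join_singleton] at ih ⊢
        rw [ih]
      | cons b u =>
        rw [PySem.Chars.join_cons_cons] at ih ⊢
        simp only [List.cons_append]
        rw [ih]

theorem pvAltGo_nil : pvAltGo [] = [] := by
  rw [pvAltGo]
  simp [pvPartitionNL, pvIsHeaderC, PySem.Chars.startswith]

-- the key step: dropping header lines then joining = B's partition loop
theorem pvMain (cs : List Char) :
    PySem.Chars.join ['\n'] (List.dropWhile pvIsHeaderC (pvLines cs)) = pvAltGo cs := by
  rw [pvAltGo, pvPartition_fst]
  by_cases hh : pvIsHeaderC (cs.takeWhile (· ≠ '\n')) = true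
  · rw [if_pos hh, pvLines_shape cs, List.dropWhile_cons, if_pos hh]
    by_cases hm : '\n' ∈ cs
    · rw [if_pos hm, pvMain (cs.drop ((cs.takeWhile (· ≠ '\n')).length + 1))]
      have : (pvPartitionNL cs).2.2 = cs.drop ((cs.takeWhile (· ≠ '\n')).length + 1) := by
        simp [pvPartitionNL, hm]
      rw [this]
    · rw [if_neg hm]
      have : (pvPartitionNL cs).2.2 = [] := by simp [pvPartitionNL, hm]
      rw [this, pvAltGo_nil, List.dropWhile_nil, PySem.Chars.join_nil]
  · rw [if_neg hh, pvLines_shape cs, List.dropWhile_cons, if_neg hh, ← pvLines_shape cs]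
    exact pvJoin_pvLines cs
termination_by cs.length
decreasing_by
  have h1 : cs ≠ [] := by
    intro h
    subst h
    simp at hm
  have h2 : 0 < cs.length := List.length_pos_of_ne_nil h1
  simp only [List.length_drop]
  omega

-- pvIsHeader on a string is pvIsHeaderC on its characters
theorem pvIsHeader_eq (l : List Char) : pvIsHeader (String.ofList l) = pvIsHeaderC l := by
  simp only [pvIsHeader, pvIsHeaderC, PySem.Str.startswith, PySem.Str.isIn,
    String.toList_ofList]
  rfl

-- ===== VERDICT (by name: the statement is the Claim_ definition above) =====
theorem strip_chunk_headers_py_spec : Claim_equal_strip_chunk_headers_py := by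
  intro text _
  unfold Spec_strip_chunk_headers_py strip_chunk_headers_py strip_chunk_headers_py_alt
  have hsep : ("\n" : String).toList = ['\n'] := rfl
  simp only [PySem.Str.split?, PySem.Chars.split?, hsep, List.isEmpty_cons, if_neg Bool.false_ne_true,
    Option.map_some, Option.getD_some, pvLoopA_eq_dropWhile, pvSplitOn_eq_pvLines]
  have hdw : List.dropWhile pvIsHeader ((pvLines text.toList).map String.ofList)
      = (List.dropWhile pvIsHeaderC (pvLines text.toList)).map String.ofList := by
    rw [List.dropWhile_map, show (pvIsHeader ∘ String.ofList) = pvIsHeaderC from funext pvIsHeader_eq]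
  rw [hdw]
  simp only [PySem.Str.strip]
  refine congrArg (fun l => String.ofList (PySem.Chars.strip l)) ?_
  rw [PySem.Str.toList_join, String.toList_ofList, List.map_map]
  have hmap : (String.toList ∘ String.ofList) = id := by
    funext l
    simp
  rw [hmap, List.map_id]
  simpa using pvMain text.toList
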